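-- pv_equiv track=rewrite | github.com/johnrizzo1/transcriber | transcriber/tools/builtin/text_processing.py | _get_character_distribution
-- ===== SOURCE A (Python) =====
-- from typing import Any, Dict, List, Optional, Union
--
-- def _get_character_distribution(text: str) -> Dict[str, int]:
--     """Get character type distribution."""
--     stats = {
--         "letters": 0,
--         "digits": 0,
--         "spaces": 0,
--         "punctuation": 0,
--         "other": 0
--     }
--
--     for char in text:
--         if char.isalpha():
--             stats["letters"] += 1
--         elif char.isdigit():
--             stats["digits"] += 1
--         elif char.isspace():
--             stats["spaces"] += 1
--         elif char in ".,!?;:\"'()[]{}":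
--             stats["punctuation"] += 1
--         else:
--             stats["other"] += 1
--
--     return stats
-- ===== SOURCE B (Python) =====
-- def _get_character_distribution(text: str):
--     """Get character type distribution.
--
--     Each explicit bucket is its own predicate pass; "other" is the
--     arithmetic complement instead of an else branch (the four predicates
--     are pairwise disjoint).
--     """
--     letters = sum(1 for c in text if c.isalpha())
--     digits = sum(1 for c in text if c.isdigit())
--     spaces = sum(1 for c in text if c.isspace())
--     punctuation = sum(1 for c in text if c in ".,!?;:\"'()[]{}")
--     other = len(text) - letters - digits - spaces - punctuation
--     return {
--         "letters": letters,
--         "digits": digits,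
--         "spaces": spaces,
--         "punctuation": punctuation,
--         "other": other,
--     }
-- ===== Notes on version B (the rewrite author's own statement) =====
-- stated objective: alternative
-- what changed: Replaces the single branching elif loop over a mutable counter dict with four independent predicate passes and derives the fifth bucket as the closed-form complement: the text length minus the four counts.
import Mathlib
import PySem

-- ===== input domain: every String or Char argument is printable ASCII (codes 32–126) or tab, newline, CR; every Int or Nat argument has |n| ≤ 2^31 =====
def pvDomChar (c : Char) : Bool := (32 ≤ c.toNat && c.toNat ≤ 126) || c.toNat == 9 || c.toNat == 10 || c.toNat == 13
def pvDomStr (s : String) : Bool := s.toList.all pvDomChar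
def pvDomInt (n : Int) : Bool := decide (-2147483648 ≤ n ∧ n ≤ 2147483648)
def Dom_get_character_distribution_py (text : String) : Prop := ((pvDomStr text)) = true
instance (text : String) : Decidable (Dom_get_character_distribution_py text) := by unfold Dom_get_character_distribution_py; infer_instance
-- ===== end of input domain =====

-- B replaces A's single branching loop over a mutable counter dict by four independent
-- predicate passes plus a closed-form complement for "other" (objective: alternative).

-- ===== PORT A =====
-- the punctuation string ".,!?;:\"'()[]{}" as a character list (exact: `char in s` for a
-- single char is membership in s's characters)
def pvPunct : List Char := ".,!?;:\"'()[]{}".toList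

-- loop body of A: the elif chain updating the counter dict in place
def pvStepA (d : PySem.Dict String Int) (c : Char) : PySem.Dict String Int :=
  if PySem.Chars.isalpha c then d.modify "letters" 0 (· + 1)
  else if PySem.Chars.isdigit c then d.modify "digits" 0 (· + 1)
  else if PySem.Chars.isspace c then d.modify "spaces" 0 (· + 1)
  else if pvPunct.contains c then d.modify "punctuation" 0 (· + 1)
  else d.modify "other" 0 (· + 1)

def get_character_distribution_py (text : String) : List (String × Int) :=
  (text.toList.foldl pvStepA
    (PySem.Dict.ofList
      [("letters", 0), ("digits", 0), ("spaces", 0), ("punctuation", 0), ("other", 0)])).items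

-- ===== PORT B =====
def get_character_distribution_py_alt (text : String) : List (String × Int) :=
  let cs := text.toList
  let letters : Int := cs.countP (fun c => PySem.Chars.isalpha c)
  let digits : Int := cs.countP (fun c => PySem.Chars.isdigit c)
  let spaces : Int := cs.countP (fun c => PySem.Chars.isspace c)
  let punctuation : Int := cs.countP (fun c => pvPunct.contains c)
  let other : Int := (cs.length : Int) - letters - digits - spaces - punctuation
  [("letters", letters), ("digits", digits), ("spaces", spaces),
   ("punctuation", punctuation), ("other", other)]

-- ===== PRECONDITION & SPEC =====
def Spec_get_character_distribution_py (text : String) (out : List (String × Int)) : Prop := out = get_character_distribution_py_alt text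
instance (text : String) (out : List (String × Int)) : Decidable (Spec_get_character_distribution_py text out) := by unfold Spec_get_character_distribution_py; infer_instance

-- ===== CLAIM (what is proved, stated in full; the proofs are below) =====
def Claim_equal_get_character_distribution_py : Prop := ∀ (text : String), Dom_get_character_distribution_py text → Spec_get_character_distribution_py text (get_character_distribution_py text)

-- ===== LEMMAS AND PROOFS =====

def pvMkd (l d s p o : Int) : PySem.Dict String Int :=
  PySem.Dict.ofList
    [("letters", l), ("digits", d), ("spaces", s), ("punctuation", p), ("other", o)]

lemma pvMkd_letters (l d s p o : Int) :
    (pvMkd l d s p o).modify "letters" 0 (· + 1) = pvMkd (l + 1) d s p o := rfl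
lemma pvMkd_digits (l d s p o : Int) :
    (pvMkd l d s p o).modify "digits" 0 (· + 1) = pvMkd l (d + 1) s p o := rfl
lemma pvMkd_spaces (l d s p o : Int) :
    (pvMkd l d s p o).modify "spaces" 0 (· + 1) = pvMkd l d (s + 1) p o := rfl
lemma pvMkd_punct (l d s p o : Int) :
    (pvMkd l d s p o).modify "punctuation" 0 (· + 1) = pvMkd l d s (p + 1) o := rfl
lemma pvMkd_other (l d s p o : Int) :
    (pvMkd l d s p o).modify "other" 0 (· + 1) = pvMkd l d s p (o + 1) := rfl

-- the four bucket predicates are pairwise disjoint (unconditionally on Char)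
lemma alpha_not_digit (c : Char) (h : PySem.Chars.isalpha c = true) :
    PySem.Chars.isdigit c = false := by
  simp only [PySem.Chars.isalpha, PySem.Chars.isupper, PySem.Chars.islower,
    PySem.Chars.isdigit, Bool.or_eq_true, Bool.and_eq_true, decide_eq_true_eq,
    Bool.and_eq_false_iff, decide_eq_false_iff_not,
    Char.le_def, UInt32.le_iff_toNat_le] at *
  simp only [show '0'.val.toNat = 48 from rfl, show '9'.val.toNat = 57 from rfl,
    show 'A'.val.toNat = 65 from rfl, show 'Z'.val.toNat = 90 from rfl,
    show 'a'.val.toNat = 97 from rfl, show 'z'.val.toNat = 122 from rfl] at *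
  omega
lemma alpha_not_space (c : Char) (h : PySem.Chars.isalpha c = true) :
    PySem.Chars.isspace c = false := by
  simp only [PySem.Chars.isalpha, PySem.Chars.isupper, PySem.Chars.islower,
    PySem.Chars.isspace, Bool.or_eq_true, Bool.and_eq_true, decide_eq_true_eq,
    Bool.or_eq_false_iff, Bool.and_eq_false_iff, decide_eq_false_iff_not,
    Char.le_def, UInt32.le_iff_toNat_le, Char.toNat] at *
  simp only [show '0'.val.toNat = 48 from rfl, show '9'.val.toNat = 57 from rfl,
    show 'A'.val.toNat = 65 from rfl, show 'Z'.val.toNat = 90 from rfl,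
    show 'a'.val.toNat = 97 from rfl, show 'z'.val.toNat = 122 from rfl] at *
  omega
lemma digit_not_space (c : Char) (h : PySem.Chars.isdigit c = true) :
    PySem.Chars.isspace c = false := by
  simp only [PySem.Chars.isdigit, PySem.Chars.isspace, Bool.or_eq_true,
    Bool.and_eq_true, decide_eq_true_eq,
    Bool.or_eq_false_iff, Bool.and_eq_false_iff, decide_eq_false_iff_not,
    Char.le_def, UInt32.le_iff_toNat_le, Char.toNat] at *
  simp only [show '0'.val.toNat = 48 from rfl, show '9'.val.toNat = 57 from rfl,
    show 'A'.val.toNat = 65 from rfl, show 'Z'.val.toNat = 90 from rfl,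
    show 'a'.val.toNat = 97 from rfl, show 'z'.val.toNat = 122 from rfl] at *
  omega
lemma punct_cases (c : Char) (h : pvPunct.contains c = true) :
    PySem.Chars.isalpha c = false ∧ PySem.Chars.isdigit c = false ∧
      PySem.Chars.isspace c = false := by
  simp [pvPunct] at h
  rcases h with rfl|rfl|rfl|rfl|rfl|rfl|rfl|rfl|rfl|rfl|rfl|rfl|rfl|rfl <;> exact ⟨rfl, rfl, rfl⟩

lemma loopA (cs : List Char) : ∀ l d s p o : Int,
    cs.foldl pvStepA (pvMkd l d s p o) =
      pvMkd (l + (cs.countP (fun c => PySem.Chars.isalpha c) : Int))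
            (d + (cs.countP (fun c => PySem.Chars.isdigit c) : Int))
            (s + (cs.countP (fun c => PySem.Chars.isspace c) : Int))
            (p + (cs.countP (fun c => pvPunct.contains c) : Int))
            (o + ((cs.length : Int)
                  - (cs.countP (fun c => PySem.Chars.isalpha c) : Int)
                  - (cs.countP (fun c => PySem.Chars.isdigit c) : Int)
                  - (cs.countP (fun c => PySem.Chars.isspace c) : Int)
                  - (cs.countP (fun c => pvPunct.contains c) : Int))) := by
  induction cs with
  | nil => intro l d s p o; simp
  | cons c cs ih =>
    intro l d s p o
    simp only [List.foldl_cons, pvStepA]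
    by_cases ha : PySem.Chars.isalpha c = true
    · rw [if_pos ha, pvMkd_letters, ih]
      have h1 := alpha_not_digit c ha
      have h2 := alpha_not_space c ha
      have h3 : pvPunct.contains c = false := by
        by_contra h
        exact absurd ha (by simpa using (punct_cases c (by simpa using h)).1)
      simp only [List.countP_cons, ha, h1, h2, h3, if_pos, if_neg, Bool.false_eq_true,
        ite_true, ite_false, List.length_cons]
      congr 1 <;> push_cast <;> ring
    · rw [if_neg ha]
      by_cases hd : PySem.Chars.isdigit c = true
      · rw [if_pos hd, pvMkd_digits, ih]
        have h2 := digit_not_space c hd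
        have h3 : pvPunct.contains c = false := by
          by_contra h
          exact absurd hd (by simpa using (punct_cases c (by simpa using h)).2.1)
        simp only [List.countP_cons, ha, hd, h2, h3, Bool.false_eq_true,
          ite_true, ite_false, List.length_cons]
        congr 1 <;> push_cast <;> ring
      · rw [if_neg hd]
        by_cases hs : PySem.Chars.isspace c = true
        · rw [if_pos hs, pvMkd_spaces, ih]
          have h3 : pvPunct.contains c = false := by
            by_contra h
            exact absurd hs (by simpa using (punct_cases c (by simpa using h)).2.2)
          simp only [List.countP_cons, ha, hd, hs, h3, Bool.false_eq_true,
            ite_true, ite_false, List.length_cons]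
          congr 1 <;> push_cast <;> ring
        · rw [if_neg hs]
          by_cases hp : pvPunct.contains c = true
          · rw [if_pos hp, pvMkd_punct, ih]
            simp only [List.countP_cons, ha, hd, hs, hp, Bool.false_eq_true,
              ite_true, ite_false, List.length_cons]
            congr 1 <;> push_cast <;> ring
          · rw [if_neg hp, pvMkd_other, ih]
            simp only [List.countP_cons, ha, hd, hs, hp, Bool.false_eq_true,
              ite_true, ite_false, List.length_cons]
            congr 1 <;> push_cast <;> ring

-- ===== VERDICT (by name: the statement is the Claim_ definition above) =====
theorem get_character_distribution_py_spec : Claim_equal_get_character_distribution_py := by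
  intro text _
  unfold Spec_get_character_distribution_py
  unfold get_character_distribution_py get_character_distribution_py_alt
  have h0 : (PySem.Dict.ofList
      [("letters", (0:Int)), ("digits", 0), ("spaces", 0), ("punctuation", 0), ("other", 0)]) =
      pvMkd 0 0 0 0 0 := rfl
  rw [h0, loopA]
  simp only [zero_add]
  rfl
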